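-- pv_equiv track=rewrite | github.com/wooseungw/panollava | anyres_token_budget.py | recommend_shrink_factor
-- ===== SOURCE A (Python) =====
-- import math
-- from typing import Tuple
--
-- def tokens_for_square(size: int, patch: int, add_cls: bool=True) -> int:
--     """정사각 size 입력을 패치크기 patch로 토큰화했을 때의 토큰 수(approx)."""
--     n = math.floor(size / patch)
--     tok = n * n
--     return tok + (1 if add_cls else 0)
--
-- def total_tokens(
--     base_size: int, tile_size: int, num_tiles: int,
--     patch: int = 14, add_cls: bool=True, include_global: bool=True
-- ) -> int:
--     t_global = tokens_for_square(base_size, patch, add_cls) if include_global else 0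
--     t_each = tokens_for_square(tile_size, patch, add_cls)
--     return t_global + num_tiles * t_each
--
-- def recommend_shrink_factor(
--     base_size: int, tile_size: int, num_tiles: int,
--     patch: int, T_max: int, add_cls: bool=True, include_global: bool=True
-- ) -> Tuple[int, int]:
--     """
--     토큰이 T_max를 넘으면 타일 토큰을 s^2 배 축소(=해상도/patch 등가 축소)하는 정수 s>=1 선택.
--     반환: (s, total_after)
--     """
--     current = total_tokens(base_size, tile_size, num_tiles, patch, add_cls, include_global)
--     if current <= T_max:
--         return (1, current)  # 축약 불필요
--
--     # 타일 토큰만 정수 축소인자 s^2로 줄이는 보수적 정책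
--     # s in {1,2,3,4,...} 중 최소 s 찾기
--     t_global = tokens_for_square(base_size, patch, add_cls) if include_global else 0
--     t_each = tokens_for_square(tile_size, patch, add_cls)
--
--     s = 2
--     while True:
--         t_each_shrunk = max(1, math.floor(t_each / (s * s)))
--         total = t_global + num_tiles * t_each_shrunk
--         if total <= T_max:
--             return (s, total)
--         s += 1
-- ===== SOURCE B (Python) =====
-- import math
--
-- def recommend_shrink_factor(base_size, tile_size, num_tiles, patch, T_max, add_cls=True, include_global=True):
--     cls = 1 if add_cls else 0
--     t_global = ((base_size // patch) ** 2 + cls) if include_global else 0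
--     t_each = (tile_size // patch) ** 2 + cls
--     current = t_global + num_tiles * t_each
--     if current <= T_max:
--         return (1, current)
--     # smallest s >= 2 with t_each // s**2 <= cap, solved with one integer square root
--     cap = (T_max - t_global) // num_tiles
--     s = max(2, math.isqrt(t_each // (cap + 1)) + 1)
--     return (s, t_global + num_tiles * max(1, t_each // (s * s)))
-- ===== Notes on version B (the rewrite author's own statement) =====
-- stated objective: alternative
-- what changed: A searches the shrink factor by trying s = 2, 3, 4, ... until the token budget fits; B solves the monotone inequality t_each // s^2 <= cap in closed form with one integer square root (math.isqrt), so the trial loop disappears. Pre_ excludes patch = 0 (A raises ZeroDivisionError), over-budget inputs where A's loop never terminates, and over-budget inputs with t_each > 2^53, where A's float division rounds so its value is a float artefact.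
-- outside the precondition, e.g. on recommend_shrink_factor(0, 10, 1, 5, 0, True, False): A does not finish within the time limit, B returns (3, 1); on recommend_shrink_factor(1, 1, 1, 0, 10, True, True): A raises ZeroDivisionError, B raises ZeroDivisionError
import Mathlib
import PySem

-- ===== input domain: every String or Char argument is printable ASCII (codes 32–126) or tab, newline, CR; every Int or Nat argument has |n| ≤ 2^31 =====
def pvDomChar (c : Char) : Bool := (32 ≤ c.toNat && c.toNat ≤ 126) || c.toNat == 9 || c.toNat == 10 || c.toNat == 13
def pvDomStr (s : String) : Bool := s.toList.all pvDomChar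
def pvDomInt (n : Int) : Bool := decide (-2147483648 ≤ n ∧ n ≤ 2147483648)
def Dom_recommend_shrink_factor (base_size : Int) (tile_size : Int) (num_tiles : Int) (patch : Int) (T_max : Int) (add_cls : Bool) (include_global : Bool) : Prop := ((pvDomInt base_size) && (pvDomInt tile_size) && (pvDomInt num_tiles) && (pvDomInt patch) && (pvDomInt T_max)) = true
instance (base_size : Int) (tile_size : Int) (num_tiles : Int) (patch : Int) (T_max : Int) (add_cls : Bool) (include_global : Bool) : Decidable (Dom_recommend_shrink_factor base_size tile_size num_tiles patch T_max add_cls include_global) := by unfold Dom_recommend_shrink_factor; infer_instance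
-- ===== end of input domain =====

-- B replaces A's trial loop over s = 2, 3, 4, … by a closed-form integer-sqrt solve of the
-- monotone budget inequality (objective: alternative algorithm).

-- ===== PORT A =====
-- tokens_for_square: n = floor(size / patch); n*n (+ 1 with CLS).
-- (Python computes floor(size/patch) through float division; PySem.Int.floordiv is exact
-- integer floor division — identical for |size|,|patch| ≤ 2^31; the loop's t_each/(s*s) is
-- identical for t_each ≤ 2^53, which Pre_ requires.)
def pvTokensForSquareA (size : Int) (patch : Int) (add_cls : Bool) : Int :=
  let n := PySem.Int.floordiv size patch
  n * n + (if add_cls then 1 else 0)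

-- total_tokens
def pvTotalTokensA (base_size tile_size num_tiles patch : Int) (add_cls include_global : Bool) : Int :=
  (if include_global then pvTokensForSquareA base_size patch add_cls else 0)
    + num_tiles * pvTokensForSquareA tile_size patch add_cls

-- the 'while True: s += 1' loop, with fuel (the Python loop has none; Pre_ guarantees
-- termination, and the fuel chosen in recommend_shrink_factor is sufficient under Pre_)
def pvLoopA (t_global t_each num_tiles T_max : Int) : Nat → Int → List Int
  | 0, _ => []
  | fuel + 1, s =>
    let t_each_shrunk := max 1 (PySem.Int.floordiv t_each (s * s))
    let total := t_global + num_tiles * t_each_shrunk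
    if total ≤ T_max then [s, total] else pvLoopA t_global t_each num_tiles T_max fuel (s + 1)

def recommend_shrink_factor (base_size : Int) (tile_size : Int) (num_tiles : Int) (patch : Int) (T_max : Int) (add_cls : Bool) (include_global : Bool) : List Int :=
  let current := pvTotalTokensA base_size tile_size num_tiles patch add_cls include_global
  if current ≤ T_max then [1, current]
  else
    let t_global := if include_global then pvTokensForSquareA base_size patch add_cls else 0
    let t_each := pvTokensForSquareA tile_size patch add_cls
    pvLoopA t_global t_each num_tiles T_max (t_each.toNat + 4) 2

-- ===== PORT B =====
def recommend_shrink_factor_alt (base_size : Int) (tile_size : Int) (num_tiles : Int) (patch : Int) (T_max : Int) (add_cls : Bool) (include_global : Bool) : List Int :=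
  let cls : Int := if add_cls then 1 else 0
  let t_global : Int := if include_global then (PySem.Int.floordiv base_size patch) ^ 2 + cls else 0
  let t_each : Int := (PySem.Int.floordiv tile_size patch) ^ 2 + cls
  let current := t_global + num_tiles * t_each
  if current ≤ T_max then [1, current]
  else
    let cap := PySem.Int.floordiv (T_max - t_global) num_tiles
    let s : Int := max 2 ((Nat.sqrt (PySem.Int.floordiv t_each (cap + 1)).toNat : Int) + 1)
    [s, t_global + num_tiles * max 1 (PySem.Int.floordiv t_each (s * s))]

-- ===== PRECONDITION & SPEC =====
-- Pre_ excludes: (a) patch = 0 (Python raises ZeroDivisionError); (b) inputs whose loop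
-- never terminates (Python A diverges: num_tiles = 0 over budget; num_tiles > 0 with
-- tg + num_tiles > T_max; num_tiles < 0 over budget with a positive per-tile count, where
-- shrinking only raises the total); (c) inputs that reach the loop with t_each > 2^53,
-- where Python's float division t_each/(s*s) can round across an integer so A's returned
-- value is a float-rounding artefact no exact-integer port can match.
def Pre_recommend_shrink_factor (base_size : Int) (tile_size : Int) (num_tiles : Int) (patch : Int) (T_max : Int) (add_cls : Bool) (include_global : Bool) : Prop :=
  patch ≠ 0 ∧
  (let cls : Int := if add_cls then 1 else 0
   let tg : Int := if include_global then (PySem.Int.floordiv base_size patch) ^ 2 + cls else 0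
   let te : Int := (PySem.Int.floordiv tile_size patch) ^ 2 + cls
   ¬ (tg + num_tiles * te ≤ T_max) →
     te ≤ 9007199254740992 ∧ tg + num_tiles ≤ T_max ∧
     (1 ≤ num_tiles ∨ (num_tiles < 0 ∧ te = 0)))
instance (base_size : Int) (tile_size : Int) (num_tiles : Int) (patch : Int) (T_max : Int) (add_cls : Bool) (include_global : Bool) : Decidable (Pre_recommend_shrink_factor base_size tile_size num_tiles patch T_max add_cls include_global) := by unfold Pre_recommend_shrink_factor; infer_instance

def pvWitness_recommend_shrink_factor : Int × Int × Int × Int × Int × Bool × Bool := (384, 336, 4, 14, 1000, true, true)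

def Spec_recommend_shrink_factor (base_size : Int) (tile_size : Int) (num_tiles : Int) (patch : Int) (T_max : Int) (add_cls : Bool) (include_global : Bool) (out : List Int) : Prop := out = recommend_shrink_factor_alt base_size tile_size num_tiles patch T_max add_cls include_global
instance (base_size : Int) (tile_size : Int) (num_tiles : Int) (patch : Int) (T_max : Int) (add_cls : Bool) (include_global : Bool) (out : List Int) : Decidable (Spec_recommend_shrink_factor base_size tile_size num_tiles patch T_max add_cls include_global out) := by unfold Spec_recommend_shrink_factor; infer_instance

-- ===== CLAIM (what is proved, stated in full; the proofs are below) =====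
def Claim_equal_recommend_shrink_factor : Prop := ∀ (base_size : Int) (tile_size : Int) (num_tiles : Int) (patch : Int) (T_max : Int) (add_cls : Bool) (include_global : Bool), Dom_recommend_shrink_factor base_size tile_size num_tiles patch T_max add_cls include_global → Pre_recommend_shrink_factor base_size tile_size num_tiles patch T_max add_cls include_global → Spec_recommend_shrink_factor base_size tile_size num_tiles patch T_max add_cls include_global (recommend_shrink_factor base_size tile_size num_tiles patch T_max add_cls include_global)

-- ===== LEMMAS AND PROOFS =====

-- the loop returns at the least s' ≥ s satisfying the budget, given enough fuel
theorem pvLoopA_eq (tg te nt T : Int) (fuel : Nat) (s sstar : Int)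
    (hle : s ≤ sstar)
    (hP : tg + nt * max 1 (PySem.Int.floordiv te (sstar * sstar)) ≤ T)
    (hmin : ∀ u : Int, s ≤ u → u < sstar → ¬ (tg + nt * max 1 (PySem.Int.floordiv te (u * u)) ≤ T))
    (hfuel : (sstar - s).toNat < fuel) :
    pvLoopA tg te nt T fuel s = [sstar, tg + nt * max 1 (PySem.Int.floordiv te (sstar * sstar))] := by
  induction fuel generalizing s with
  | zero => omega
  | succ n ih =>
    simp only [pvLoopA]
    by_cases h : tg + nt * max 1 (PySem.Int.floordiv te (s * s)) ≤ T
    · have hs : s = sstar := by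
        by_contra hne
        exact hmin s le_rfl (lt_of_le_of_ne hle hne) h
      subst hs; simp [h]
    · have hne : s ≠ sstar := by rintro rfl; exact h hP
      have hlt : s < sstar := lt_of_le_of_ne hle hne
      simp only [h, if_false]
      exact ih (s + 1) (by omega) (fun u hu hu2 => hmin u (by omega) hu2) (by omega)

-- core equivalence on the loop branch, over abstract tg/te
theorem pvCore (tg te nt T : Int) (hte : 0 ≤ te)
    (hcur : ¬ (tg + nt * te ≤ T))
    (hfit : tg + nt ≤ T)
    (hnt : 1 ≤ nt ∨ (nt < 0 ∧ te = 0)) :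
    pvLoopA tg te nt T (te.toNat + 4) 2 =
      (let cap := PySem.Int.floordiv (T - tg) nt
       let s : Int := max 2 ((Nat.sqrt (PySem.Int.floordiv te (cap + 1)).toNat : Int) + 1)
       [s, tg + nt * max 1 (PySem.Int.floordiv te (s * s))]) := by
  rcases hnt with hnt1 | ⟨hnt, hte0⟩
  · -- nt ≥ 1
    have hntpos : (0:Int) < nt := hnt1
    set cap := PySem.Int.floordiv (T - tg) nt with hcap
    have hcapmul : cap * nt ≤ T - tg :=
      (PySem.Int.le_floordiv_iff_mul_le hntpos).mp le_rfl
    have hcap1 : 1 ≤ cap := by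
      rw [hcap, PySem.Int.le_floordiv_iff_mul_le hntpos]; linarith [hfit]
    have hcappos : (0:Int) < cap + 1 := by omega
    set q := PySem.Int.floordiv te (cap + 1) with hq
    have hq0 : 0 ≤ q := by
      rw [hq, PySem.Int.floordiv_eq_ediv_of_pos hcappos]
      exact Int.ediv_nonneg hte (by omega)
    have hqte : q ≤ te := by
      rw [hq, PySem.Int.floordiv_eq_ediv_of_pos hcappos]
      exact Int.ediv_le_self _ hte
    -- characterisation: for 0 < s, the budget holds at s iff q < s*s
    have hchar : ∀ s : Int, 0 < s →
        ((tg + nt * max 1 (PySem.Int.floordiv te (s * s)) ≤ T) ↔ q < s * s) := by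
      intro s hs
      have hss : (0:Int) < s * s := by positivity
      constructor
      · intro h
        have hx : max 1 (PySem.Int.floordiv te (s * s)) ≤ cap := by
          rw [hcap, PySem.Int.le_floordiv_iff_mul_le hntpos]
          nlinarith [h]
        have hfd : PySem.Int.floordiv te (s * s) ≤ cap := le_trans (le_max_right _ _) hx
        have hlt : te < (cap + 1) * (s * s) := by
          have := (PySem.Int.floordiv_lt_iff_lt_mul (a := te) (b := s * s) (q := cap + 1) hss).mp (by omega)
          linarith
        rw [hq, PySem.Int.floordiv_lt_iff_lt_mul hcappos]
        linarith
      · intro h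
        have hlt : te < (s * s) * (cap + 1) := by
          have := (PySem.Int.floordiv_lt_iff_lt_mul (a := te) (b := cap + 1) (q := s * s) hcappos).mp (by omega)
          linarith
        have hfd : PySem.Int.floordiv te (s * s) ≤ cap := by
          have := (PySem.Int.floordiv_lt_iff_lt_mul (a := te) (b := s * s) (q := cap + 1) hss).mpr (by linarith)
          omega
        have hx : max 1 (PySem.Int.floordiv te (s * s)) ≤ cap := max_le hcap1 hfd
        nlinarith [hx]
    set r : Int := (Nat.sqrt q.toNat : Int) with hr
    have hr0 : 0 ≤ r := by positivity
    have hsq : r * r ≤ q := by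
      have h1 := Nat.sqrt_le' q.toNat
      rw [pow_two] at h1
      have h2 : ((Nat.sqrt q.toNat * Nat.sqrt q.toNat : Nat) : Int) ≤ ((q.toNat : Nat) : Int) := by
        exact_mod_cast h1
      rw [hr]; push_cast at h2 ⊢; omega
    have hsucc : q < (r + 1) * (r + 1) := by
      have h1 := Nat.lt_succ_sqrt' q.toNat
      rw [pow_two, Nat.succ_eq_add_one] at h1
      have h2 : ((q.toNat : Nat) : Int) < (((Nat.sqrt q.toNat + 1) * (Nat.sqrt q.toNat + 1) : Nat) : Int) := by
        exact_mod_cast h1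
      rw [hr]; push_cast at h2 ⊢; omega
    set sB : Int := max 2 (r + 1) with hsB
    have hsB2 : 2 ≤ sB := le_max_left _ _
    have hsBr : r + 1 ≤ sB := le_max_right _ _
    have hPB : q < sB * sB := by nlinarith
    have hrq : r ≤ q := by nlinarith
    have hsBle : sB ≤ q + 2 := max_le (by omega) (by omega)
    have hloop := pvLoopA_eq tg te nt T (te.toNat + 4) 2 sB hsB2
      ((hchar sB (by omega)).mpr hPB)
      (fun u hu hlt h => by
        have huB : u < r + 1 ∨ u < 2 := by
          rcases (lt_max_iff.mp (hsB ▸ hlt)) with h' | h'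
          · exact Or.inr h'
          · exact Or.inl h'
        have hur : u ≤ r := by omega
        have : q < u * u := (hchar u (by omega)).mp h
        nlinarith)
      (by omega)
    rw [hloop]
  · -- nt < 0, te = 0: the first trial s = 2 already fits and the closed form gives s = 2
    subst hte0
    have hz : ∀ b : Int, PySem.Int.floordiv 0 b = 0 := by
      intro b; simp [PySem.Int.floordiv]
    have hloop : pvLoopA tg 0 nt T ((0:Int).toNat + 4) 2 =
        [2, tg + nt * max 1 (PySem.Int.floordiv 0 (2 * 2))] := by
      apply pvLoopA_eq tg 0 nt T _ 2 2 le_rfl _ (fun u hu hu2 _ => by omega) (by norm_num)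
      rw [hz]; simpa using hfit
    rw [hloop]
    simp [hz, Nat.sqrt]
-- ===== VERDICT (by name: the statement is the Claim_ definition above) =====
theorem recommend_shrink_factor_spec : Claim_equal_recommend_shrink_factor := by
  intro base_size tile_size num_tiles patch T_max add_cls include_global _ hPre
  obtain ⟨hp, hrest⟩ := hPre
  unfold Spec_recommend_shrink_factor recommend_shrink_factor recommend_shrink_factor_alt
    pvTotalTokensA pvTokensForSquareA
  simp only [pow_two] at hrest ⊢
  set cls : Int := if add_cls then 1 else 0 with hcls
  set nb := PySem.Int.floordiv base_size patch with hnb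
  set ntl := PySem.Int.floordiv tile_size patch with hntl
  set tg : Int := if include_global then nb * nb + cls else 0 with htg
  set te : Int := ntl * ntl + cls with hte
  have hte0 : 0 ≤ te := by
    have h1 : 0 ≤ ntl * ntl := mul_self_nonneg _
    have h2 : 0 ≤ cls := by rw [hcls]; split <;> norm_num
    omega
  by_cases hc : tg + num_tiles * te ≤ T_max
  · simp [hc]
  · obtain ⟨hbound, hfit, hnt⟩ := hrest hc
    simp only [hc, if_false]
    exact pvCore tg te num_tiles T_max hte0 hc hfit hnt
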